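-- pv_equiv track=rewrite | github.com/niksacvorovic/codefair-2024 | vegaitcodefair2024.py | puddles
-- ===== SOURCE A (Python) =====
-- from collections import deque
--
-- def puddles(matrix):
--     # We can represent the puddle as a m*n matrix filled with ones and zeroes
--     depth = len(matrix)
--     water = 0
--     for i in range(depth):
--         # The iteration through the matrix starts from the last row
--         current_row = matrix[depth - 1 - i]
--         stack = deque()
--         for field in current_row:
--             # We skip over the empty fields at the beginning and push all other fields on a stack
--             if field == 0 and len(stack) == 0:
--                 pass
--             else:
--                 stack.append(field)
--         # This variable will check whether we're inside a puddle or not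
--         # We will remove empty fields top of the stack until we reach a field with mud, starting from there
--         # water will build up in the puddle, which we will account for in the water variable
--         inside = False
--         while len(stack) != 0:
--             stack_top = stack.pop()
--             if not inside and stack_top == 0:
--                 continue
--             elif stack_top == 1:
--                 inside = True
--             elif inside and stack_top == 0:
--                 water += 1
--     return water
-- ===== SOURCE B (Python) =====
-- def puddles(matrix):
--     # Boundary-finding decomposition: a zero holds water iff some wall (nonzero)
--     # lies to its left and some field of mud (1) lies to its right.
--     water = 0
--     for row in matrix:
--         if 1 in row:
--             right = len(row) - 1 - row[::-1].index(1)      # last 1 (right wall)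
--             left = next(i for i, v in enumerate(row) if v != 0)  # first nonzero (left wall)
--             water += row[left:right].count(0)
--     return water
-- ===== Notes on version B (the rewrite author's own statement) =====
-- stated objective: simpler
-- what changed: Replaces A's per-row stack building (push with leading-zero skip) and right-to-left pop loop with an 'inside' flag by a boundary-finding decomposition: find the first nonzero (left wall) and the last 1 (right wall) of each row and count the zeros in the slice between them; the per-element Python-level deque work becomes C-level list reverse/index/slice/count, a constant-factor speedup.
import Mathlib
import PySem

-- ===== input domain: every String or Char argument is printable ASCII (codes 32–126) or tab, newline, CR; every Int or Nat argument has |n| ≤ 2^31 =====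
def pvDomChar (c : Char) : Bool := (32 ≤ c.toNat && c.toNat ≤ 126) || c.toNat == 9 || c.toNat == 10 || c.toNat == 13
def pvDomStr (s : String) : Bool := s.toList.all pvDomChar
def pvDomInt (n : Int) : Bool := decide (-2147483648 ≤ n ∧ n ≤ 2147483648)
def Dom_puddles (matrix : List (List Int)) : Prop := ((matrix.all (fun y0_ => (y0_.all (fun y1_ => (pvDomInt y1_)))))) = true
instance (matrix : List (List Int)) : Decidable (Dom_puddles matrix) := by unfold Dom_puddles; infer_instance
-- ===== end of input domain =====

-- B replaces A's stack-push/pop traversal with a per-row boundary-finding (first nonzero wall,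
-- last 1) + zero-count decomposition; objective: simpler, same O(m*n) cost.

-- ===== PORT A =====
-- the 'while len(stack) != 0' pop loop; stack.pop() takes the LAST element, so the loop is
-- transcribed as head recursion over the reversed stack, with the same 'inside'/'water' state
def pvPopLoop : List Int → Bool → Int → Int
  | [], _, water => water
  | stack_top :: rest, inside, water =>
    if !inside && stack_top == 0 then pvPopLoop rest inside water
    else if stack_top == 1 then pvPopLoop rest true water
    else if inside && stack_top == 0 then pvPopLoop rest inside (water + 1)
    else pvPopLoop rest inside water

def puddles (matrix : List (List Int)) : Int :=
  let depth := matrix.length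
  (PySem.List.pyRange 0 (depth : Int) 1).foldl
    (fun water i =>
      let current_row := PySem.List.pyGetD matrix ((depth : Int) - 1 - i) []
      let stack := current_row.foldl
        (fun st field => if field == 0 && st.isEmpty then st else st ++ [field]) []
      pvPopLoop stack.reverse false water) 0

-- ===== PORT B =====
-- 'next(i for i, v in enumerate(row) if v != 0)' (only used when a 1, hence a nonzero, exists)
def pvFirstNz? : List Int → Option Nat
  | [] => none
  | v :: t => if v != 0 then some 0 else (pvFirstNz? t).map (· + 1)

def puddles_alt (matrix : List (List Int)) : Int :=
  matrix.foldl
    (fun water row =>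
      if row.contains 1 then
        let right : Nat := row.length - 1 - ((PySem.List.index? row.reverse 1).getD 0)
        let left : Nat := (pvFirstNz? row).getD 0
        water + (PySem.List.count (PySem.List.slice row (some (left : Int)) (some (right : Int))) 0 : Int)
      else water) 0

-- ===== PRECONDITION & SPEC =====
def Spec_puddles (matrix : List (List Int)) (out : Int) : Prop := out = puddles_alt matrix
instance (matrix : List (List Int)) (out : Int) : Decidable (Spec_puddles matrix out) := by unfold Spec_puddles; infer_instance

-- ===== CLAIM (what is proved, stated in full; the proofs are below) =====
def Claim_equal_puddles : Prop := ∀ (matrix : List (List Int)), Dom_puddles matrix → Spec_puddles matrix (puddles matrix)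

-- ===== LEMMAS AND PROOFS =====

-- the per-row contribution of each port
def pvRowA (row : List Int) : Int :=
  pvPopLoop ((row.foldl (fun st field => if field == 0 && st.isEmpty then st else st ++ [field]) []).reverse) false 0

def pvRowB (row : List Int) : Int :=
  if row.contains 1 then
    (PySem.List.count (PySem.List.slice row
        (some (((pvFirstNz? row).getD 0 : Nat) : Int))
        (some ((row.length - 1 - ((PySem.List.index? row.reverse 1).getD 0) : Nat) : Int))) 0 : Int)
  else 0

theorem pvPopLoop_shift (l : List Int) (inside : Bool) (w : Int) :
    pvPopLoop l inside w = w + pvPopLoop l inside 0 := by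
  induction l generalizing inside w with
  | nil => simp [pvPopLoop]
  | cons t rest ih =>
    simp only [pvPopLoop]
    split_ifs with h1 h2 h3
    · apply ih
    · apply ih
    · rw [ih inside (w + 1), ih inside (0 + 1)]; omega
    · apply ih

theorem pvPopLoop_true (l : List Int) (w : Int) :
    pvPopLoop l true w = w + (l.countP (fun x => x == 0) : Int) := by
  induction l generalizing w with
  | nil => simp [pvPopLoop]
  | cons t rest ih =>
    simp only [pvPopLoop, Bool.not_true, Bool.false_and, Bool.true_and]
    by_cases h : t = 1
    · simp [h, ih]
    · by_cases h0 : t = 0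
      · simp [h0, ih]; omega
      · simp [h0, h, ih]

theorem pvPopLoop_skip (l m : List Int) (h : (1 : Int) ∉ l) (w : Int) :
    pvPopLoop (l ++ m) false w = pvPopLoop m false w := by
  induction l with
  | nil => simp
  | cons t rest ih =>
    have ht : t ≠ 1 := fun e => h (e ▸ List.mem_cons_self ..)
    simp only [List.cons_append, pvPopLoop, Bool.not_false, Bool.true_and, Bool.false_and]
    have := ih (fun hm => h (List.mem_cons_of_mem _ hm))
    by_cases h0 : t = 0 <;> simp [h0, ht, this]

theorem pvPush_ne_nil (l st : List Int) (h : st ≠ []) :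
    l.foldl (fun st field => if field == 0 && st.isEmpty then st else st ++ [field]) st = st ++ l := by
  induction l generalizing st with
  | nil => simp
  | cons a t ih =>
    simp only [List.foldl_cons]
    rw [show (if a == 0 && st.isEmpty then st else st ++ [a]) = st ++ [a] by
          simp [List.isEmpty_iff, h]]
    rw [ih _ (by simp), List.append_assoc]; rfl

theorem pvPush_nil (l : List Int) :
    l.foldl (fun st field => if field == 0 && st.isEmpty then st else st ++ [field]) [] =
      l.dropWhile (fun x => x == 0) := by
  induction l with
  | nil => rfl
  | cons a t ih =>
    simp only [List.foldl_cons, List.dropWhile_cons]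
    by_cases h0 : a = 0
    · simpa [h0] using ih
    · simp only [List.isEmpty_nil, Bool.and_true, beq_iff_eq, h0, if_false, List.nil_append]
      rw [pvPush_ne_nil _ _ (by simp)]; rfl

theorem pvFirstNz?_spec (l : List Int) (h : ∃ x ∈ l, x ≠ 0) :
    pvFirstNz? l = some (l.takeWhile (fun x => x == 0)).length := by
  induction l with
  | nil => simp at h
  | cons a t ih =>
    by_cases h0 : a = 0
    · obtain ⟨x, hx, hxn⟩ := h
      have hxt : x ∈ t := by
        rcases List.mem_cons.mp hx with rfl | hxt
        · exact absurd h0 hxn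
        · exact hxt
      simp [pvFirstNz?, h0, ih ⟨x, hxt, hxn⟩]
    · simp [pvFirstNz?, h0]

theorem pvRow_eq (row : List Int) : pvRowA row = pvRowB row := by
  by_cases hmem : (1 : Int) ∈ row
  · -- the row contains mud: row = z ++ (d ++ 1 :: e) with z the leading zeros and 1 ∉ e (last 1)
    have hrow : row.takeWhile (fun x => x == 0) ++ row.dropWhile (fun x => x == 0) = row :=
      List.takeWhile_append_dropWhile
    have h1c : (1 : Int) ∈ row.dropWhile (fun x => x == 0) := by
      rcases List.mem_append.mp (by rw [hrow]; exact hmem) with hz | hc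
      · have := List.mem_takeWhile_imp hz; simp at this
      · exact hc
    obtain ⟨k, hk⟩ := Option.isSome_iff_exists.mp
      ((PySem.List.index?_isSome_iff _ _).mpr (List.mem_reverse.mpr h1c))
    obtain ⟨pre, suf, hsplit, hlen, hpre⟩ := (PySem.List.index?_eq_some_iff _ _ _).mp hk
    obtain ⟨z, hzE⟩ : ∃ z, row.takeWhile (fun x => x == 0) = z := ⟨_, rfl⟩
    have hc : row.dropWhile (fun x => x == 0) = suf.reverse ++ 1 :: pre.reverse := by
      have := congrArg List.reverse hsplit
      simpa [List.reverse_append] using this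
    rw [hzE, hc] at hrow
    -- A side
    have hA : pvRowA row = (suf.reverse.countP (fun x => x == 0) : Int) := by
      unfold pvRowA
      rw [pvPush_nil, hc]
      have : (suf.reverse ++ 1 :: pre.reverse).reverse = pre ++ 1 :: suf := by
        simp [List.reverse_append]
      rw [this, show pre ++ 1 :: suf = pre ++ (1 :: suf) from rfl, pvPopLoop_skip _ _ hpre]
      show pvPopLoop (1 :: suf) false 0 = _
      simp only [pvPopLoop]
      norm_num
      rw [pvPopLoop_true]
      simp
    -- B side
    have hB : pvRowB row = (suf.reverse.countP (fun x => x == 0) : Int) := by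
      unfold pvRowB
      rw [if_pos (List.contains_iff_mem.mpr hmem)]
      have hidx : PySem.List.index? row.reverse 1 = some pre.length := by
        rw [PySem.List.index?_eq_some_iff]
        exact ⟨pre, suf ++ z.reverse, by rw [← hrow]; simp [List.reverse_append], rfl, hpre⟩
      have hfn : pvFirstNz? row = some z.length := by
        rw [pvFirstNz?_spec row ⟨1, hmem, one_ne_zero⟩, hzE]
      rw [hidx, hfn]
      simp only [Option.getD_some]
      have hlenrow : row.length = z.length + (suf.reverse.length + 1 + pre.length) := by
        rw [← hrow]; simp; omega
      rw [show row.length - 1 - pre.length = z.length + suf.reverse.length by omega]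
      have hslice : PySem.List.slice row (some (z.length : Int))
          (some ((z.length + suf.reverse.length : Nat) : Int)) = suf.reverse := by
        rw [PySem.List.slice_natCast, ← hrow, List.drop_left, Nat.add_sub_cancel_left]
        exact List.take_left
      rw [hslice, PySem.List.count_eq, List.count_eq_countP]
    rw [hA, hB]
  · -- no mud in the row: both sides are 0
    unfold pvRowA pvRowB
    rw [if_neg (by simp [hmem]), pvPush_nil]
    have h1 : (1 : Int) ∉ (row.dropWhile (fun x => x == 0)).reverse := by
      intro h
      exact hmem ((List.dropWhile_sublist _).subset (List.mem_reverse.mp h))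
    simpa using pvPopLoop_skip _ [] h1 0

theorem pvIdx_rev (m : List (List Int)) (f : List Int → Int) :
    List.map (fun i : Int => f (PySem.List.pyGetD m ((m.length : Int) - 1 - i) []))
        (List.map (fun k : Nat => (k : Int)) (List.range m.length)) = m.reverse.map f := by
  rw [List.map_map]
  apply List.ext_getElem
  · simp
  · intro i h1 h2
    have hi : i < m.length := by simpa using h1
    simp only [List.getElem_map, List.getElem_range, Function.comp_apply, List.getElem_reverse]
    have hcast : ((m.length : Int) - 1 - (i : Int)) = ((m.length - 1 - i : Nat) : Int) := by omega
    rw [hcast, PySem.List.pyGetD_natCast, List.getD_eq_getElem _ _ (by omega)]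

theorem pvA_sum (m : List (List Int)) : puddles m = (m.map pvRowA).sum := by
  unfold puddles
  simp only []
  rw [PySem.List.foldl_congr_mem (g := fun water i =>
        water + pvRowA (PySem.List.pyGetD m ((m.length : Int) - 1 - i) []))
      (h := by
        intro acc x _
        simp only []
        rw [pvPopLoop_shift]
        rfl)]
  rw [PySem.List.foldl_add, PySem.List.pyRange_one]
  simp only [Int.sub_zero, Int.toNat_natCast, zero_add]
  rw [pvIdx_rev m pvRowA, List.map_reverse, List.sum_reverse]

theorem pvB_sum (m : List (List Int)) : puddles_alt m = (m.map pvRowB).sum := by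
  unfold puddles_alt
  rw [PySem.List.foldl_congr_mem (g := fun water row => water + pvRowB row)
      (h := by
        intro acc row _
        simp only [pvRowB]
        split_ifs with h <;> simp)]
  rw [PySem.List.foldl_add]
  simp

-- ===== VERDICT (by name: the statement is the Claim_ definition above) =====
theorem puddles_spec : Claim_equal_puddles := by
  intro matrix _
  unfold Spec_puddles
  rw [pvA_sum, pvB_sum]
  exact congrArg _ (List.map_congr_left (fun r _ => pvRow_eq r))
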